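-- pv_equiv track=rewrite | github.com/joanchero/StockAnalysis | PEAK-0.5a4dev_r2085/src/peak/tools/n2/commands.py | pipesplit
-- ===== SOURCE A (Python) =====
-- def pipesplit(s):
--     # shortcut common case
--     if '|' not in s:
--         return s, None
--
--     quoted = back = False
--     i = 0
--     for c in s:
--         if back:
--             back = False
--         elif c == '\\' and quoted:
--             back = True
--         elif c == '"':
--             quoted = not quoted
--         elif c == '|' and not quoted:
--             return s[:i], s[i+1:]
--
--         i += 1
--
--     return s, None
-- ===== SOURCE B (Python) =====
-- def pipesplit(s):
--     n = len(s)
--     i = 0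
--     while i < n:
--         c = s[i]
--         if c == '"':
--             i += 1
--             while i < n:
--                 if s[i] == '\\':
--                     i += 2
--                 elif s[i] == '"':
--                     i += 1
--                     break
--                 else:
--                     i += 1
--         elif c == '|':
--             return s[:i], s[i+1:]
--         else:
--             i += 1
--     return s, None
-- ===== Notes on version B (the rewrite author's own statement) =====
-- stated objective: alternative
-- what changed: Replaces the flag-based per-character state machine (quoted/back booleans) with an index-driven outer scan that consumes each quoted span in a dedicated inner loop (skipping escaped characters by jumping two positions) and drops A's '|' membership pre-check.
import Mathlib
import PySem

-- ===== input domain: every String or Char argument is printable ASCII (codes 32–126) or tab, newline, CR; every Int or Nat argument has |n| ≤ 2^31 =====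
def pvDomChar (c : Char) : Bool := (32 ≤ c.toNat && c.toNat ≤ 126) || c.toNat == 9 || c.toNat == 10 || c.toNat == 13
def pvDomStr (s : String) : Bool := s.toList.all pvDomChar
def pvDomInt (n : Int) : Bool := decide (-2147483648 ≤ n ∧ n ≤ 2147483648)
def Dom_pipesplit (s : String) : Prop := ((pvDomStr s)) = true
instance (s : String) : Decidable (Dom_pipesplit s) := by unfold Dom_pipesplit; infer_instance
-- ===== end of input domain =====

-- B replaces A's boolean state machine by an index loop that skips each quoted span in an inner loop; same cost, different decomposition.

-- ===== PORT A =====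
-- the for-loop over s with flags quoted/back and running index i
def pipesplitLoop (s : String) : List Char → Bool → Bool → Nat → String × Option String
  | [], _, _, _ => (s, none)
  | c :: rest, quoted, back, i =>
    if back then pipesplitLoop s rest quoted false (i+1)
    else if c == '\\' && quoted then pipesplitLoop s rest quoted true (i+1)
    else if c == '"' then pipesplitLoop s rest (!quoted) back (i+1)
    else if c == '|' && !quoted then (String.ofList (s.toList.take i), some (String.ofList (s.toList.drop (i+1))))
    else pipesplitLoop s rest quoted back (i+1)

def pipesplit (s : String) : String × Option String :=
  if s.toList.contains '|' then pipesplitLoop s s.toList false false 0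
  else (s, none)

-- ===== PORT B =====
-- inner while: consume a quoted span, returning the remaining suffix and the new index
def pipesplitInner : List Char → Nat → List Char × Nat
  | [], i => ([], i)
  | c :: rest, i =>
    if c == '\\' then pipesplitInner (rest.drop 1) (i+2)
    else if c == '"' then (rest, i+1)
    else pipesplitInner rest (i+1)
termination_by l => l.length
decreasing_by
  · simp only [List.length_drop, List.length_cons]; omega
  · simp

theorem pipesplitInner_len_le : ∀ (n : Nat) (l : List Char), l.length ≤ n → ∀ (i : Nat),
    (pipesplitInner l i).1.length ≤ l.length := by
  intro n
  induction n with
  | zero =>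
    intro l hl i
    have : l = [] := List.eq_nil_of_length_eq_zero (Nat.le_zero.mp hl)
    subst this; simp [pipesplitInner]
  | succ n ih =>
    intro l hl i
    cases l with
    | nil => simp [pipesplitInner]
    | cons c rest =>
      have hr : rest.length ≤ n := by simp at hl; omega
      simp only [pipesplitInner]
      split
      · have h1 : (rest.drop 1).length ≤ n := by simp [List.length_drop]; omega
        have := ih (rest.drop 1) h1 (i+2)
        simp [List.length_drop] at this ⊢; omega
      · split
        · simp
        · have := ih rest hr (i+1); simp; omega

-- outer while over the remaining suffix with index i
def pipesplitOuter (s : String) : List Char → Nat → String × Option String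
  | [], _ => (s, none)
  | c :: rest, i =>
    if c == '"' then
      pipesplitOuter s (pipesplitInner rest (i+1)).1 (pipesplitInner rest (i+1)).2
    else if c == '|' then (String.ofList (s.toList.take i), some (String.ofList (s.toList.drop (i+1))))
    else pipesplitOuter s rest (i+1)
termination_by l => l.length
decreasing_by
  · have := pipesplitInner_len_le rest.length rest (Nat.le_refl _) (i+1); simp; omega
  · simp

def pipesplit_alt (s : String) : String × Option String :=
  pipesplitOuter s s.toList 0

-- ===== PRECONDITION & SPEC =====
def Spec_pipesplit (s : String) (out : String × Option String) : Prop := out = pipesplit_alt s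
instance (s : String) (out : String × Option String) : Decidable (Spec_pipesplit s out) := by unfold Spec_pipesplit; infer_instance

-- ===== CLAIM (what is proved, stated in full; the proofs are below) =====
def Claim_equal_pipesplit : Prop := ∀ (s : String), Dom_pipesplit s → Spec_pipesplit s (pipesplit s)

-- ===== LEMMAS AND PROOFS =====

-- the quoted state of A's loop corresponds to B's inner loop followed by the unquoted state
theorem loopA_quoted (s : String) : ∀ (n : Nat) (l : List Char), l.length ≤ n → ∀ (i : Nat),
    pipesplitLoop s l true false i
      = pipesplitLoop s (pipesplitInner l i).1 false false (pipesplitInner l i).2 := by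
  intro n
  induction n with
  | zero =>
    intro l hl i
    have : l = [] := List.eq_nil_of_length_eq_zero (Nat.le_zero.mp hl)
    subst this; simp [pipesplitLoop, pipesplitInner]
  | succ n ih =>
    intro l hl i
    cases l with
    | nil => simp [pipesplitLoop, pipesplitInner]
    | cons c rest =>
      have hr : rest.length ≤ n := by simp at hl; omega
      by_cases hb : c = '\\'
      · subst hb
        cases rest with
        | nil => simp [pipesplitLoop, pipesplitInner]
        | cons d rest2 =>
          simp only [pipesplitLoop, pipesplitInner]
          simp
          exact ih rest2 (by simp at hr; omega) (i+1+1)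
      · by_cases hq : c = '"'
        · subst hq
          simp [pipesplitLoop, pipesplitInner]
        · by_cases hp : c = '|'
          · subst hp
            simp only [pipesplitLoop, pipesplitInner]
            simp
            exact ih rest hr (i+1)
          · simp only [pipesplitLoop, pipesplitInner]
            simp [hb, hq, hp]
            exact ih rest hr (i+1)

-- the unquoted state of A's loop is B's outer loop
theorem loopA_eq_outer (s : String) : ∀ (n : Nat) (l : List Char), l.length ≤ n → ∀ (i : Nat),
    pipesplitLoop s l false false i = pipesplitOuter s l i := by
  intro n
  induction n with
  | zero =>
    intro l hl i
    have : l = [] := List.eq_nil_of_length_eq_zero (Nat.le_zero.mp hl)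
    subst this; simp [pipesplitLoop, pipesplitOuter]
  | succ n ih =>
    intro l hl i
    cases l with
    | nil => simp [pipesplitLoop, pipesplitOuter]
    | cons c rest =>
      have hr : rest.length ≤ n := by simp at hl; omega
      by_cases hq : c = '"'
      · subst hq
        simp only [pipesplitLoop, pipesplitOuter]
        simp
        rw [loopA_quoted s rest.length rest (Nat.le_refl _) (i+1)]
        exact ih _ ((pipesplitInner_len_le rest.length rest (Nat.le_refl _) (i+1)).trans hr) _
      · by_cases hp : c = '|'
        · subst hp
          simp [pipesplitLoop, pipesplitOuter]
        · simp only [pipesplitLoop, pipesplitOuter]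
          simp [hq, hp]
          exact ih rest hr (i+1)

-- the inner loop only consumes characters: its remainder is a suffix of its input
theorem pipesplitInner_suffix : ∀ (n : Nat) (l : List Char), l.length ≤ n → ∀ (i : Nat),
    (pipesplitInner l i).1 <:+ l := by
  intro n
  induction n with
  | zero =>
    intro l hl i
    have : l = [] := List.eq_nil_of_length_eq_zero (Nat.le_zero.mp hl)
    subst this; simp [pipesplitInner]
  | succ n ih =>
    intro l hl i
    cases l with
    | nil => simp [pipesplitInner]
    | cons c rest =>
      have hr : rest.length ≤ n := by simp at hl; omega
      simp only [pipesplitInner]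
      split
      · exact ((ih (rest.drop 1) (by simp only [List.length_drop]; omega) (i+2)).trans
          ((List.drop_suffix 1 rest).trans (List.suffix_cons c rest)))
      · split
        · exact List.suffix_cons c rest
        · exact (ih rest hr (i+1)).trans (List.suffix_cons c rest)

-- without any '|' the outer loop falls through to (s, none)
theorem outer_no_pipe (s : String) : ∀ (n : Nat) (l : List Char), l.length ≤ n → ∀ (i : Nat),
    '|' ∉ l → pipesplitOuter s l i = (s, none) := by
  intro n
  induction n with
  | zero =>
    intro l hl i _
    have : l = [] := List.eq_nil_of_length_eq_zero (Nat.le_zero.mp hl)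
    subst this; simp [pipesplitOuter]
  | succ n ih =>
    intro l hl i hmem
    cases l with
    | nil => simp [pipesplitOuter]
    | cons c rest =>
      have hr : rest.length ≤ n := by simp at hl; omega
      have hc : c ≠ '|' := by intro h; exact hmem (h ▸ List.mem_cons_self ..)
      have hrm : '|' ∉ rest := fun h => hmem (List.mem_cons_of_mem _ h)
      by_cases hq : c = '"'
      · subst hq
        simp only [pipesplitOuter]
        simp
        refine ih _ ((pipesplitInner_len_le rest.length rest (Nat.le_refl _) (i+1)).trans hr) _ ?_
        intro hmem'
        exact hrm ((pipesplitInner_suffix rest.length rest (Nat.le_refl _) (i+1)).subset hmem')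
      · simp only [pipesplitOuter]
        simp [hq, hc]
        exact ih rest hr (i+1) hrm

-- ===== VERDICT (by name: the statement is the Claim_ definition above) =====
theorem pipesplit_spec : Claim_equal_pipesplit := by
  intro s _
  unfold Spec_pipesplit pipesplit pipesplit_alt
  split
  · exact loopA_eq_outer s s.toList.length s.toList (Nat.le_refl _) 0
  · next h =>
    rw [outer_no_pipe s s.toList.length s.toList (Nat.le_refl _) 0 (by simpa using h)]
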